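-- pv_equiv track=rewrite | github.com/BIGGIGREP/IGREP | common_tools/mongo_igdb_tools.py | convert_text_to_index_field_text
-- ===== SOURCE A (Python) =====
-- def convert_text_to_index_field_text(value):
-- 	"""
-- 		Input
-- 		-----
-- 		value: String or list of strings
--
-- 		Output
-- 		------
-- 		String or list of strings with the strings converted as such:
-- 			eliminate any whitespaces, eliminate any [',',';','/',':','-'], and convert the remaining characters to lowercase
-- 	"""
--
-- 	def _text_conversion_to_index_text(text):
-- 		replace_these_chars = ['_', ',', ';', '-', '/', ':', ' ']
-- 		val = "".join(text.split()).lower()  # changed to lowercase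
-- 		for r in replace_these_chars:
-- 			val = val.replace(r, '')
-- 		return val
-- 	return [_text_conversion_to_index_text(str(item)) for item in value] if isinstance(value, list) else _text_conversion_to_index_text(str(value))
-- ===== SOURCE B (Python) =====
-- def convert_text_to_index_field_text(value):
-- 	"""Same contract as A: strip whitespace and [_,;,-/:] and lowercase; one pass per string."""
-- 	delset = {'_', ',', ';', '-', '/', ':'}
--
-- 	def _clean(text):
-- 		return ''.join(c.lower() for c in text if not c.isspace() and c not in delset)
-- 	return [_clean(str(item)) for item in value] if isinstance(value, list) else _clean(str(value))
-- ===== Notes on version B (the rewrite author's own statement) =====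
-- stated objective: simpler
-- what changed: A's split()+join+lower plus seven sequential replace() scans is replaced by a single character-level pass that filters whitespace/punctuation and lowercases each kept character.
import Mathlib
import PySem

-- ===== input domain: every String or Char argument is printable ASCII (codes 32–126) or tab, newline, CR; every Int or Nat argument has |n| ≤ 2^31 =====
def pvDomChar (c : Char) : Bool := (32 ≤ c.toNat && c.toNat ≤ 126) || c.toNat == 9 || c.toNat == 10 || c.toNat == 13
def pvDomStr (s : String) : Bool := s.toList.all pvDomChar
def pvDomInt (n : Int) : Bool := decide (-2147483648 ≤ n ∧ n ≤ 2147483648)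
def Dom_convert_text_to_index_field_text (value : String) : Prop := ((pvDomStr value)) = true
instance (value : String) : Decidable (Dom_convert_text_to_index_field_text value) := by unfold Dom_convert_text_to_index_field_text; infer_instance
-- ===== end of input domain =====

-- B replaces A's split()+join+lower plus seven sequential replace() passes by a single
-- filter-then-lowercase character pass (objective: simpler).


-- ===== PORT A =====
def convert_text_to_index_field_text (value : String) : String :=
  let val := PySem.Str.lower (PySem.Str.join "" (PySem.Str.split₀ value))
  List.foldl (fun v r => PySem.Str.replace v r "") val ["_", ",", ";", "-", "/", ":", " "]

-- ===== PORT B =====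
def convert_text_to_index_field_text_alt (value : String) : String :=
  let delset : PySem.Set Char := PySem.Set.ofList ['_', ',', ';', '-', '/', ':']
  String.ofList ((value.toList.filter
      (fun c => !PySem.Chars.isspace c && !PySem.Set.contains delset c)).map
    PySem.Chars.lowerChar)

-- ===== PRECONDITION & SPEC =====
def Spec_convert_text_to_index_field_text (value : String) (out : String) : Prop := out = convert_text_to_index_field_text_alt value
instance (value : String) (out : String) : Decidable (Spec_convert_text_to_index_field_text value out) := by unfold Spec_convert_text_to_index_field_text; infer_instance

-- ===== CLAIM (what is proved, stated in full; the proofs are below) =====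
def Claim_equal_convert_text_to_index_field_text : Prop := ∀ (value : String), Dom_convert_text_to_index_field_text value → Spec_convert_text_to_index_field_text value (convert_text_to_index_field_text value)

-- ===== LEMMAS AND PROOFS =====

theorem flatten_intersperse_nil (l : List (List Char)) :
    (List.intersperse [] l).flatten = l.flatten := by
  induction l with
  | nil => rfl
  | cons x xs ih =>
    cases xs with
    | nil => rfl
    | cons y ys => simp_all [List.intersperse]

-- join "" (s.split()) keeps exactly the non-whitespace characters, in order.
theorem split₀_go_flatten (cs cur : List Char) (acc : List (List Char)) :
    (PySem.Chars.split₀.go cs cur acc).flatten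
      = acc.reverse.flatten ++ cur.reverse ++ cs.filter (fun c => !PySem.Chars.isspace c) := by
  induction cs generalizing cur acc with
  | nil =>
    simp only [PySem.Chars.split₀.go, List.filter_nil, List.append_nil]
    split_ifs with h
    · simp [List.isEmpty_iff.mp h]
    · simp
  | cons c rest ih =>
    simp only [PySem.Chars.split₀.go]
    by_cases hs : PySem.Chars.isspace c
    · simp only [hs, if_true]
      by_cases he : cur.isEmpty
      · simp [ih, hs, List.isEmpty_iff.mp he]
      · simp [he, ih, hs]
    · simp [hs, ih]

theorem join_split₀ (cs : List Char) :
    PySem.Chars.join [] (PySem.Chars.split₀ cs)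
      = cs.filter (fun c => !PySem.Chars.isspace c) := by
  have h := split₀_go_flatten cs [] []
  simpa [PySem.Chars.join, PySem.Chars.split₀, List.intercalate, flatten_intersperse_nil] using h

-- s.replace(r, '') for a single character r removes exactly the occurrences of r.
theorem replace_go_single (r : Char) (fuel : Nat) (l acc : List Char) (h : l.length ≤ fuel) :
    PySem.Chars.replace.go [r] [] fuel l acc
      = acc.reverse ++ l.filter (fun c => !(c == r)) := by
  induction fuel generalizing l acc with
  | zero =>
    have : l = [] := List.eq_nil_of_length_eq_zero (Nat.le_zero.mp h)
    subst this; simp [PySem.Chars.replace.go]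
  | succ n ih =>
    cases l with
    | nil => simp [PySem.Chars.replace.go]
    | cons c t =>
      simp only [PySem.Chars.replace.go]
      by_cases hp : List.isPrefixOf [r] (c :: t)
      · have hc : c = r := by
          simp [List.isPrefixOf] at hp
          exact hp.symm
        rw [if_pos hp]
        rw [show List.drop (List.length [r]) (c :: t) = t from rfl,
            show (([] : List Char).reverse ++ acc) = acc from rfl,
            ih t acc (by simpa using Nat.le_of_succ_le_succ h)]
        simp [hc]
      · have hc : (c == r) = false := by
          rcases Bool.eq_false_or_eq_true (c == r) with h' | h'
          · exact absurd (by simp [List.isPrefixOf, beq_iff_eq.mp h']) hp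
          · exact h'
        rw [if_neg hp]
        rw [ih t (c :: acc) (by simpa using Nat.le_of_succ_le_succ h)]
        simp [hc]

theorem replace_single (r : Char) (l : List Char) :
    PySem.Chars.replace l [r] [] = l.filter (fun c => !(c == r)) := by
  simp [PySem.Chars.replace, replace_go_single r l.length l [] le_rfl]

theorem toNat_ofNat_valid (n : Nat) (h : n.isValidChar) : (Char.ofNat n).toNat = n := by
  simp only [Char.ofNat, dif_pos h]
  simp [Char.ofNatAux, Char.toNat, UInt32.toNat_ofNatLT]

-- lowering a non-whitespace character neither produces nor destroys one of the
-- removed punctuation characters (and never produces a space).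
theorem lowerChar_punct (x : Char) (hx : x ∈ (['_', ',', ';', '-', '/', ':', ' '] : List Char))
    (c : Char) (hc : PySem.Chars.isspace c = false) :
    (PySem.Chars.lowerChar c == x) = (c == x) := by
  simp only [PySem.Chars.lowerChar, PySem.Chars.isupper]
  split_ifs with h
  · rw [Bool.and_eq_true, decide_eq_true_eq, decide_eq_true_eq] at h
    obtain ⟨ha, hb⟩ := h
    simp [Char.le_def] at ha hb
    have ha' : (65:UInt32).toNat ≤ c.val.toNat := UInt32.le_iff_toNat_le.mp ha
    have hb' : c.val.toNat ≤ (90:UInt32).toNat := UInt32.le_iff_toNat_le.mp hb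
    simp [UInt32.toNat_ofNat] at ha' hb'
    have hca : 65 ≤ c.toNat := ha'
    have hcb : c.toNat ≤ 90 := hb'
    have hup : (Char.ofNat (c.toNat + 32)).toNat = c.toNat + 32 :=
      toNat_ofNat_valid _ (Or.inl (by omega))
    have hxv : x.toNat = 95 ∨ x.toNat = 44 ∨ x.toNat = 59 ∨ x.toNat = 45 ∨ x.toNat = 47 ∨
        x.toNat = 58 ∨ x.toNat = 32 := by
      fin_cases hx <;> decide
    rcases hxv with hxv | hxv | hxv | hxv | hxv | hxv | hxv
    all_goals {
    have hne1 : ¬ (Char.ofNat (c.toNat + 32)) = x := by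
      intro he
      have : (Char.ofNat (c.toNat + 32)).toNat = x.toNat := by rw [he]
      rw [hup] at this; omega
    have hne2 : ¬ c = x := by
      intro he
      have : c.toNat = x.toNat := by rw [he]
      omega
    simp [hne1, hne2] }
  · rfl

-- ===== VERDICT (by name: the statement is the Claim_ definition above) =====
theorem convert_text_to_index_field_text_spec : Claim_equal_convert_text_to_index_field_text := by
  intro value _
  unfold Spec_convert_text_to_index_field_text convert_text_to_index_field_text
    convert_text_to_index_field_text_alt
  apply String.toList_inj.mp
  simp only [List.foldl, PySem.Str.toList_replace, PySem.Str.toList_lower, PySem.Str.toList_join,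
    PySem.Str.split₀_map_toList, String.toList_ofList]
  rw [show ("" : String).toList = [] from rfl, show ("_" : String).toList = ['_'] from rfl,
    show ("," : String).toList = [','] from rfl, show (";" : String).toList = [';'] from rfl,
    show ("-" : String).toList = ['-'] from rfl, show ("/" : String).toList = ['/'] from rfl,
    show (":" : String).toList = [':'] from rfl, show (" " : String).toList = [' '] from rfl]
  rw [join_split₀, replace_single, replace_single, replace_single, replace_single,
    replace_single, replace_single, replace_single]
  simp only [PySem.Chars.lower, List.filter_filter, List.filter_map, Function.comp_def]
  congr 1
  apply List.filter_congr
  intro c _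
  by_cases hs : PySem.Chars.isspace c
  · simp [hs]
  · have hs' : PySem.Chars.isspace c = false := by simpa using hs
    have hsp : (c == ' ') = false := by
      rcases Bool.eq_false_or_eq_true (c == ' ') with h' | h'
      · rw [beq_iff_eq.mp h'] at hs'; simp [PySem.Chars.isspace] at hs'
      · exact h'
    rw [lowerChar_punct '_' (by simp) c hs', lowerChar_punct ',' (by simp) c hs',
      lowerChar_punct ';' (by simp) c hs', lowerChar_punct '-' (by simp) c hs',
      lowerChar_punct '/' (by simp) c hs', lowerChar_punct ':' (by simp) c hs',
      lowerChar_punct ' ' (by simp) c hs']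
    simp only [PySem.Set.contains, PySem.Set.ofList, List.foldl, PySem.Set.add, hs', hsp]
    simp only [Bool.not_false, Bool.true_and]
    rw [Bool.eq_iff_iff]
    simp
    tauto
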